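-- pv_equiv track=rewrite | github.com/ChristopheJacquet/RdsSurveyor2 | core/protocol/compiler.py | field_extent
-- ===== SOURCE A (Python) =====
-- def field_extent(pos, width):
--     """Returns an array of bit-masks and an array of shifts, for all 4 blocks."""
--     # Blocks and bits are numbered from left to right.
--     first_block = pos // 16
--     first_bit = pos % 16
--     last_block = (pos+width-1) // 16
--     last_bit = (pos+width-1) % 16
--     masks = [0, 0, 0, 0]
--     shifts = [0, 0, 0, 0]
--     # Iterate over involved blocks from right to left.
--     # First, the last block, taken partially.
--     masks[last_block] = 65536 - 2**(15-last_bit)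
--     shifts[last_block] = 15-last_bit
--     cur_shl = last_bit + 1
--     for b in range(last_block-1, first_block-1, -1):
--         masks[b] = 65535
--         shifts[b] = -cur_shl
--         cur_shl += 16
--     # Fix the first mask because this block is also taken partially.
--     masks[first_block] &= 2**(16-first_bit)-1
--     return (masks, shifts)
-- ===== SOURCE B (Python) =====
-- def field_extent(pos, width):
--     """Returns an array of bit-masks and an array of shifts, for all 4 blocks."""
--     first_block = pos // 16
--     last_block, last_bit = divmod(pos + width - 1, 16)
--     # Build ONE wide integer mask covering the whole field, aligned so that its
--     # lowest set bit sits at position 15-last_bit of the last block; then peel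
--     # 16-bit chunks off it, right to left, one per involved block.
--     big = ((1 << width) - 1) << (15 - last_bit)
--     masks = [0, 0, 0, 0]
--     shifts = [0, 0, 0, 0]
--     for k, b in enumerate(range(last_block, first_block - 1, -1)):
--         masks[b] = (big >> (16 * k)) & 0xFFFF
--         shifts[b] = (15 - last_bit) - 16 * k
--     return (masks, shifts)
-- ===== Notes on version B (the rewrite author's own statement) =====
-- stated objective: alternative
-- what changed: Instead of constructing per-block masks (special-cased last block, middle-block loop with a cur_shl accumulator, first-block AND fixup), B builds ONE wide integer mask ((1<<width)-1)<<(15-last_bit) covering the whole field and peels 16-bit chunks off it, one per involved block, with the shift as a closed form of the chunk index.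
-- outside the precondition, e.g. on field_extent(0, 0): A returns ([0, 0, 0, 65535], [0, 0, 0, 0]), B returns ([0, 0, 0, 0], [0, 0, 0, 0]); on field_extent(5, -3): A returns ([0, 0, 0, 0], [14, 0, 0, 0]), B raises ValueError
import Mathlib
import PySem

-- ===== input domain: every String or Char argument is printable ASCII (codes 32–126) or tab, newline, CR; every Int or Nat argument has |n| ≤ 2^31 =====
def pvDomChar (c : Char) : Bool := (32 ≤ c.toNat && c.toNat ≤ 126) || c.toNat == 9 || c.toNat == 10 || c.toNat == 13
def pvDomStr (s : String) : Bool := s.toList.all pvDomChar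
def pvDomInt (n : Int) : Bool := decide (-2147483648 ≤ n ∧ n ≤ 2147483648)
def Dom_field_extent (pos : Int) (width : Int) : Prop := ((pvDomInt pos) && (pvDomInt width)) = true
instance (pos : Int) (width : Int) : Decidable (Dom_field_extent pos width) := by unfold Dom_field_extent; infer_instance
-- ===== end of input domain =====

-- B replaces A's three-part per-block mask construction (special-cased last block,
-- right-to-left accumulator loop over middle blocks, first-block AND fixup) by building
-- ONE wide integer mask covering the whole field and peeling 16-bit chunks off it, one
-- per involved block; an alternative decomposition of the same O(1) computation.


-- ===== PORT A =====
-- list assignment xs[i] = v on a 4-element list, with Python's negative-index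
-- wraparound: exact for -4 ≤ i < 4 (i % 4 = i + 4 for -4 ≤ i < 0), which Pre_
-- guarantees for every index either port uses
def pvSet (xs : List Int) (i : Int) (v : Int) : List Int := xs.set (i % 4).toNat v
def pvGet (xs : List Int) (i : Int) : Int := xs.getD (i % 4).toNat 0

-- ===== transliteration of A =====
def field_extent (pos : Int) (width : Int) : List Int × List Int :=
  let first_block := PySem.Int.floordiv pos 16
  let first_bit := PySem.Int.mod pos 16
  let last_block := PySem.Int.floordiv (pos + width - 1) 16
  let last_bit := PySem.Int.mod (pos + width - 1) 16
  let masks : List Int := [0, 0, 0, 0]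
  let shifts : List Int := [0, 0, 0, 0]
  let masks := pvSet masks last_block (65536 - 2 ^ (15 - last_bit).toNat)
  let shifts := pvSet shifts last_block (15 - last_bit)
  let st := (PySem.List.pyRange (last_block - 1) (first_block - 1) (-1)).foldl
    (fun (s : List Int × List Int × Int) b =>
      (pvSet s.1 b 65535, pvSet s.2.1 b (-s.2.2), s.2.2 + 16))
    (masks, shifts, last_bit + 1)
  let masks := st.1
  let shifts := st.2.1
  let masks := pvSet masks first_block
    (Int.land (pvGet masks first_block) ((2:Int) ^ (16 - first_bit).toNat - 1))
  (masks, shifts)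

-- ===== PORT B =====
-- big = ((1 << width) - 1) << (15 - last_bit); exact for width ≥ 0, which Pre_
-- guarantees (Python raises ValueError on a negative shift count, outside Pre_)
def field_extent_alt (pos : Int) (width : Int) : List Int × List Int :=
  let first_block := PySem.Int.floordiv pos 16
  let last_block := PySem.Int.floordiv (pos + width - 1) 16
  let last_bit := PySem.Int.mod (pos + width - 1) 16
  let big : Nat := (2 ^ width.toNat - 1) * 2 ^ (15 - last_bit).toNat
  (PySem.List.enumerate (PySem.List.pyRange last_block (first_block - 1) (-1))).foldl
    (fun (s : List Int × List Int) kb =>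
      (pvSet s.1 kb.2 (((big >>> (16 * kb.1.toNat)) &&& 65535 : Nat) : Int),
       pvSet s.2 kb.2 ((15 - last_bit) - 16 * kb.1)))
    ([0, 0, 0, 0], [0, 0, 0, 0])


-- ===== PRECONDITION & SPEC =====
-- Pre_ admits every field whose first and last bit positions fall inside the 4 blocks
-- (negative positions reaching them via Python's index wraparound included) and whose
-- width is positive with a span of at most 4 blocks, or is exactly 0 with both ends in
-- the same block. Excluded (beyond inputs where A raises IndexError): negative widths
-- and width-0 fields at a block boundary — degenerate inputs outside the natural domain,
-- where A's returned writes are accidents of wraparound and B's shift-based construction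
-- either raises (negative shift count) or naturally writes nothing — and fields spanning
-- more than 4 blocks, which overflow the 4-block record and only land via wraparound.
def Pre_field_extent (pos : Int) (width : Int) : Prop :=
  -64 ≤ pos ∧ pos ≤ 63 ∧ -64 ≤ pos + width - 1 ∧ pos + width - 1 ≤ 63 ∧
    ((1 ≤ width ∧
        PySem.Int.floordiv (pos + width - 1) 16 - PySem.Int.floordiv pos 16 ≤ 3) ∨
      (width = 0 ∧
        PySem.Int.floordiv (pos + width - 1) 16 = PySem.Int.floordiv pos 16))
instance (pos : Int) (width : Int) : Decidable (Pre_field_extent pos width) := by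
  unfold Pre_field_extent; infer_instance
def pvWitness_field_extent : Int × Int := (4, 10)
def Spec_field_extent (pos : Int) (width : Int) (out : List Int × List Int) : Prop := out = field_extent_alt pos width
instance (pos : Int) (width : Int) (out : List Int × List Int) : Decidable (Spec_field_extent pos width out) := by unfold Spec_field_extent; infer_instance

-- ===== CLAIM (what is proved, stated in full; the proofs are below) =====
def Claim_equal_field_extent : Prop := ∀ (pos : Int) (width : Int), Dom_field_extent pos width → Pre_field_extent pos width → Spec_field_extent pos width (field_extent pos width)

-- ===== LEMMAS AND PROOFS =====
theorem pvSet_pvSet (xs : List Int) (i a b : Int) : pvSet (pvSet xs i a) i b = pvSet xs i b := by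
  unfold pvSet; rw [List.set_set]

theorem pvGet_pvSet_self (xs : List Int) (h : xs.length = 4) (i v : Int) :
    pvGet (pvSet xs i v) i = v := by
  unfold pvGet pvSet
  have h1 : (0:Int) ≤ i % 4 := Int.emod_nonneg i (by norm_num)
  have h2 : i % 4 < 4 := Int.emod_lt_of_pos i (by norm_num)
  have : (i % 4).toNat < xs.length := by omega
  rw [List.getD_eq_getElem?_getD, List.getElem?_set_self (by simpa using this)]
  rfl

theorem val1 : ∀ f : Nat, f < 16 → ∀ l : Nat, l < 16 → f ≤ l + 1 →
    (65536 - 2 ^ (15 - l) : Int).land (2 ^ (16 - f) - 1) =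
    ((((2 ^ (l + 1 - f) - 1) * 2 ^ (15 - l)) &&& 65535 : Nat) : Int) := by decide

theorem val2_1 : ∀ f : Nat, f < 16 → ∀ l : Nat, l < 16 →
    (65536 - 2 ^ (15 - l) : Int) =
    ((((2 ^ (17 + l - f) - 1) * 2 ^ (15 - l)) &&& 65535 : Nat) : Int) := by decide

theorem val4_1 : ∀ f : Nat, f < 16 → ∀ l : Nat, l < 16 →
    (65535 : Int).land (2 ^ (16 - f) - 1) =
    (((((2 ^ (17 + l - f) - 1) * 2 ^ (15 - l)) >>> 16) &&& 65535 : Nat) : Int) := by decide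

theorem val2_2 : ∀ f : Nat, f < 16 → ∀ l : Nat, l < 16 →
    (65536 - 2 ^ (15 - l) : Int) =
    ((((2 ^ (33 + l - f) - 1) * 2 ^ (15 - l)) &&& 65535 : Nat) : Int) := by decide

theorem val3_2 : ∀ f : Nat, f < 16 → ∀ l : Nat, l < 16 →
    (65535 : Int) =
    (((((2 ^ (33 + l - f) - 1) * 2 ^ (15 - l)) >>> 16) &&& 65535 : Nat) : Int) := by decide

theorem val4_2 : ∀ f : Nat, f < 16 → ∀ l : Nat, l < 16 →
    (65535 : Int).land (2 ^ (16 - f) - 1) =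
    (((((2 ^ (33 + l - f) - 1) * 2 ^ (15 - l)) >>> 32) &&& 65535 : Nat) : Int) := by decide

theorem val2_3 : ∀ f : Nat, f < 16 → ∀ l : Nat, l < 16 →
    (65536 - 2 ^ (15 - l) : Int) =
    ((((2 ^ (49 + l - f) - 1) * 2 ^ (15 - l)) &&& 65535 : Nat) : Int) := by decide

theorem val3_3a : ∀ f : Nat, f < 16 → ∀ l : Nat, l < 16 →
    (65535 : Int) =
    (((((2 ^ (49 + l - f) - 1) * 2 ^ (15 - l)) >>> 16) &&& 65535 : Nat) : Int) := by decide

theorem val3_3b : ∀ f : Nat, f < 16 → ∀ l : Nat, l < 16 →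
    (65535 : Int) =
    (((((2 ^ (49 + l - f) - 1) * 2 ^ (15 - l)) >>> 32) &&& 65535 : Nat) : Int) := by decide

theorem val4_3 : ∀ f : Nat, f < 16 → ∀ l : Nat, l < 16 →
    (65535 : Int).land (2 ^ (16 - f) - 1) =
    (((((2 ^ (49 + l - f) - 1) * 2 ^ (15 - l)) >>> 48) &&& 65535 : Nat) : Int) := by decide

theorem field_extent_eq_of_pre : ∀ pos width : Int,
    Pre_field_extent pos width →
    field_extent pos width = field_extent_alt pos width := by
  intro pos width ⟨h1, h2, h3, h4, h5⟩
  obtain ⟨fb, f, hpos, hfb1, hfb2, hf2⟩ :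
      ∃ (fb : Int) (f : Nat), pos = 16 * fb + (f : Int) ∧ -4 ≤ fb ∧ fb ≤ 3 ∧ f < 16 :=
    ⟨pos / 16, (pos % 16).toNat, by omega, by omega, by omega, by omega⟩
  obtain ⟨lb, l, hlast, hlb1, hlb2, hl2⟩ :
      ∃ (lb : Int) (l : Nat), pos + width - 1 = 16 * lb + (l : Int) ∧ -4 ≤ lb ∧ lb ≤ 3 ∧ l < 16 :=
    ⟨(pos + width - 1) / 16, ((pos + width - 1) % 16).toNat, by omega, by omega, by omega, by omega⟩
  have hfbd : PySem.Int.floordiv pos 16 = fb := by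
    rw [PySem.Int.floordiv_eq_ediv_of_pos (by norm_num)]; omega
  have hfm : PySem.Int.mod pos 16 = (f : Int) := by
    rw [PySem.Int.mod_eq_emod_of_pos (by norm_num)]; omega
  have hlbd : PySem.Int.floordiv (pos + width - 1) 16 = lb := by
    rw [PySem.Int.floordiv_eq_ediv_of_pos (by norm_num)]; omega
  have hlm : PySem.Int.mod (pos + width - 1) 16 = (l : Int) := by
    rw [PySem.Int.mod_eq_emod_of_pos (by norm_num)]; omega
  rw [hfbd, hlbd] at h5
  have t1 : ((15:Int) - (l:Int)).toNat = 15 - l := by omega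
  have t2 : ((16:Int) - (f:Int)).toNat = 16 - f := by omega
  have hn : lb - fb = 0 ∨ lb - fb = 1 ∨ lb - fb = 2 ∨ lb - fb = 3 := by
    rcases h5 with ⟨hw1, hs⟩ | ⟨hw0, he⟩ <;> omega
  rcases hn with hn | hn | hn | hn
  · -- n = 0 : single block
    have hlb : lb = fb := by omega
    subst hlb
    have hfl : f ≤ l + 1 := by rcases h5 with ⟨hw1, _⟩ | ⟨hw0, _⟩ <;> omega
    have hwidth : width = (l : Int) - (f : Int) + 1 := by omega
    have t3 : ((l:Int) - (f:Int) + 1).toNat = l + 1 - f := by omega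
    have e1 : PySem.List.pyRange (lb - 1) (lb - 1) (-1) = [] :=
      PySem.List.pyRange_neg_one_eq_nil (by omega)
    have e2 : PySem.List.pyRange lb (lb - 1) (-1) = [lb] := by
      rw [PySem.List.pyRange_neg_one_cons (by omega), PySem.List.pyRange_neg_one_eq_nil (by omega)]
    simp only [field_extent, field_extent_alt, hfbd, hfm, hlbd, hlm]
    rw [hwidth, e1, e2, t1, t2, t3]
    simp only [PySem.List.enumerate_cons, PySem.List.enumerate_nil,
      List.foldl_cons, List.foldl_nil]
    norm_num
    rw [pvGet_pvSet_self _ (by simp), pvSet_pvSet]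
    congr 1
    exact val1 f hf2 l hl2 hfl
  · -- n = 1
    have hlb : lb = fb + 1 := by omega
    subst hlb
    have hwidth : width = 16 + (l : Int) - (f : Int) + 1 := by omega
    have t3 : ((16:Int) + (l:Int) - (f:Int) + 1).toNat = 17 + l - f := by omega
    have e1 : PySem.List.pyRange (fb + 1 - 1) (fb - 1) (-1) = [fb] := by
      rw [show fb + 1 - 1 = fb by ring, PySem.List.pyRange_neg_one_cons (by omega),
        PySem.List.pyRange_neg_one_eq_nil (by omega)]
    have e2 : PySem.List.pyRange (fb + 1) (fb - 1) (-1) = [fb + 1, fb] := by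
      rw [PySem.List.pyRange_neg_one_cons (by omega), show fb + 1 - 1 = fb by ring,
        PySem.List.pyRange_neg_one_cons (by omega), PySem.List.pyRange_neg_one_eq_nil (by omega)]
    simp only [field_extent, field_extent_alt, hfbd, hfm, hlbd, hlm]
    rw [hwidth, e1, e2, t1, t2, t3]
    simp only [PySem.List.enumerate_cons, PySem.List.enumerate_nil,
      List.foldl_cons, List.foldl_nil]
    norm_num
    rw [pvGet_pvSet_self _ (by simp [pvSet]), pvSet_pvSet]
    refine ⟨?_, ?_⟩
    · congr 1
      · congr 1
        exact val2_1 f hf2 l hl2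
      · exact val4_1 f hf2 l hl2
    · congr 1
      omega
  · -- n = 2
    have hlb : lb = fb + 2 := by omega
    subst hlb
    have hwidth : width = 32 + (l : Int) - (f : Int) + 1 := by omega
    have t3 : ((32:Int) + (l:Int) - (f:Int) + 1).toNat = 33 + l - f := by omega
    have e1 : PySem.List.pyRange (fb + 2 - 1) (fb - 1) (-1) = [fb + 1, fb] := by
      rw [show fb + 2 - 1 = fb + 1 by ring, PySem.List.pyRange_neg_one_cons (by omega),
        show fb + 1 - 1 = fb by ring, PySem.List.pyRange_neg_one_cons (by omega),
        PySem.List.pyRange_neg_one_eq_nil (by omega)]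
    have e2 : PySem.List.pyRange (fb + 2) (fb - 1) (-1) = [fb + 2, fb + 1, fb] := by
      rw [PySem.List.pyRange_neg_one_cons (by omega), show fb + 2 - 1 = fb + 1 by ring,
        PySem.List.pyRange_neg_one_cons (by omega), show fb + 1 - 1 = fb by ring,
        PySem.List.pyRange_neg_one_cons (by omega), PySem.List.pyRange_neg_one_eq_nil (by omega)]
    simp only [field_extent, field_extent_alt, hfbd, hfm, hlbd, hlm]
    rw [hwidth, e1, e2, t1, t2, t3]
    simp only [PySem.List.enumerate_cons, PySem.List.enumerate_nil,
      List.foldl_cons, List.foldl_nil]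
    norm_num
    rw [pvGet_pvSet_self _ (by simp [pvSet]), pvSet_pvSet]
    refine ⟨?_, ?_⟩
    · congr 1
      · congr 1
        · congr 1
          exact val2_2 f hf2 l hl2
        · exact val3_2 f hf2 l hl2
      · exact val4_2 f hf2 l hl2
    · congr 1
      · congr 1
        omega
      · omega
  · -- n = 3
    have hlb : lb = fb + 3 := by omega
    subst hlb
    have hwidth : width = 48 + (l : Int) - (f : Int) + 1 := by omega
    have t3 : ((48:Int) + (l:Int) - (f:Int) + 1).toNat = 49 + l - f := by omega
    have e1 : PySem.List.pyRange (fb + 3 - 1) (fb - 1) (-1) = [fb + 2, fb + 1, fb] := by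
      rw [show fb + 3 - 1 = fb + 2 by ring, PySem.List.pyRange_neg_one_cons (by omega),
        show fb + 2 - 1 = fb + 1 by ring, PySem.List.pyRange_neg_one_cons (by omega),
        show fb + 1 - 1 = fb by ring, PySem.List.pyRange_neg_one_cons (by omega),
        PySem.List.pyRange_neg_one_eq_nil (by omega)]
    have e2 : PySem.List.pyRange (fb + 3) (fb - 1) (-1) = [fb + 3, fb + 2, fb + 1, fb] := by
      rw [PySem.List.pyRange_neg_one_cons (by omega), show fb + 3 - 1 = fb + 2 by ring,
        PySem.List.pyRange_neg_one_cons (by omega), show fb + 2 - 1 = fb + 1 by ring,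
        PySem.List.pyRange_neg_one_cons (by omega), show fb + 1 - 1 = fb by ring,
        PySem.List.pyRange_neg_one_cons (by omega), PySem.List.pyRange_neg_one_eq_nil (by omega)]
    simp only [field_extent, field_extent_alt, hfbd, hfm, hlbd, hlm]
    rw [hwidth, e1, e2, t1, t2, t3]
    simp only [PySem.List.enumerate_cons, PySem.List.enumerate_nil,
      List.foldl_cons, List.foldl_nil]
    norm_num
    rw [pvGet_pvSet_self _ (by simp [pvSet]), pvSet_pvSet]
    refine ⟨?_, ?_⟩
    · congr 1
      · congr 1
        · congr 1
          · congr 1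
            exact val2_3 f hf2 l hl2
          · exact val3_3a f hf2 l hl2
        · exact val3_3b f hf2 l hl2
      · exact val4_3 f hf2 l hl2
    · congr 1
      · congr 1
        · congr 1
          omega
        · omega
      · omega


-- ===== VERDICT (by name: the statement is the Claim_ definition above) =====
theorem field_extent_spec : Claim_equal_field_extent := by
  intro pos width _ hpre
  unfold Spec_field_extent
  exact field_extent_eq_of_pre pos width hpre
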